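-- pv_equiv track=rewrite | github.com/ShuvalovAnthony/ege | 8/4562_F.py | check
-- ===== SOURCE A (Python) =====
-- def check(word):
--     if word[-1] == 'S' or word[0] == 'S': return False
--     for i in ('CC', 'OO', 'NN', 'SS', 'TT'):
--         if i in word: return False
--
--     for i in range(1, len(word) - 1):
--         if word[i] == 'S':
--             if word[i - 1] == word[i + 1]: return False
--
--     return True
-- ===== SOURCE B (Python) =====
-- def check(word):
--     if word[0] == 'S' or word[-1] == 'S':
--         return False
--     n = len(word)
--     for i in range(n - 1):
--         if word[i] == word[i + 1] and word[i] in 'CONST':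
--             return False
--         if word[i + 1] == 'S' and i + 2 < n and word[i + 2] == word[i]:
--             return False
--     return True
-- ===== Notes on version B (the rewrite author's own statement) =====
-- stated objective: alternative
-- what changed: Replaced the five separate substring scans plus a second index loop by one single left-to-right pass that checks each adjacent pair (doubled CONST letter) and each triple (S with equal neighbours) at once.
import Mathlib
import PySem

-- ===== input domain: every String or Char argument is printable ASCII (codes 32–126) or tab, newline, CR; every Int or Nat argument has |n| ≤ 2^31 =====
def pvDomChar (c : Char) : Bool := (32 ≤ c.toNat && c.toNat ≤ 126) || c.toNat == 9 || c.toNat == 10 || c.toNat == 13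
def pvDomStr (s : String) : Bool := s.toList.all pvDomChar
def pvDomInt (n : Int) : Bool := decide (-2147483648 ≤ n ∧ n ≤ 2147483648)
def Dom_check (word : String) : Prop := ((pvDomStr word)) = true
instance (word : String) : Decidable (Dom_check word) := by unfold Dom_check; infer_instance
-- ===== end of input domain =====

-- B merges A's five substring scans and separate interior index loop into one single left-to-right pass over pairs/triples (alternative decomposition; same asymptotic cost).

-- ===== PORT A =====
-- for i in range(1, len(word)-1): if word[i]=='S' and word[i-1]==word[i+1]: return False
def checkLoopA (cs : List Char) : List Int → Bool
  | [] => true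
  | i :: rest =>
    if PySem.List.pyGetD cs i ' ' == 'S' then
      if PySem.List.pyGetD cs (i - 1) ' ' == PySem.List.pyGetD cs (i + 1) ' ' then false
      else checkLoopA cs rest
    else checkLoopA cs rest

def check (word : String) : Bool :=
  if PySem.List.pyGetD word.toList (-1) ' ' == 'S' || PySem.List.pyGetD word.toList 0 ' ' == 'S' then false
  else if ["CC", "OO", "NN", "SS", "TT"].any (fun sub => PySem.Str.isIn sub word) then false
  else checkLoopA word.toList (PySem.List.pyRange 1 ((word.toList.length : Int) - 1) 1)

-- ===== PORT B =====
-- one pass: for i in range(n-1): doubled CONST letter at (i,i+1)? / 'S' at i+1 with word[i]==word[i+2]?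
def checkLoopB (cs : List Char) (n : Int) : List Int → Bool
  | [] => true
  | i :: rest =>
    if PySem.List.pyGetD cs i ' ' == PySem.List.pyGetD cs (i + 1) ' ' &&
       ("CONST".toList.contains (PySem.List.pyGetD cs i ' ')) then false
    else if PySem.List.pyGetD cs (i + 1) ' ' == 'S' && decide (i + 2 < n) &&
            (PySem.List.pyGetD cs (i + 2) ' ' == PySem.List.pyGetD cs i ' ') then false
    else checkLoopB cs n rest

def check_alt (word : String) : Bool :=
  if PySem.List.pyGetD word.toList 0 ' ' == 'S' || PySem.List.pyGetD word.toList (-1) ' ' == 'S' then false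
  else checkLoopB word.toList (word.toList.length : Int)
    (PySem.List.pyRange 0 ((word.toList.length : Int) - 1) 1)

-- ===== PRECONDITION & SPEC =====
-- Pre_ excludes only the empty string, on which Python A (and B alike) raises IndexError at word[-1]/word[0].
def Pre_check (word : String) : Prop := word ≠ ""
instance (word : String) : Decidable (Pre_check word) := by unfold Pre_check; infer_instance
def pvWitness_check : String := "CAT"

def Spec_check (word : String) (out : Bool) : Prop := out = check_alt word
instance (word : String) (out : Bool) : Decidable (Spec_check word out) := by unfold Spec_check; infer_instance

-- ===== CLAIM (what is proved, stated in full; the proofs are below) =====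
def Claim_equal_check : Prop := ∀ (word : String), Dom_check word → Pre_check word → Spec_check word (check word)

-- ===== LEMMAS AND PROOFS =====

-- the violation tested by A's interior loop / B's first branch, as Bool conditions on an index
def condA (cs : List Char) (i : Int) : Bool :=
  PySem.List.pyGetD cs i ' ' == 'S' &&
    (PySem.List.pyGetD cs (i - 1) ' ' == PySem.List.pyGetD cs (i + 1) ' ')

def condB (cs : List Char) (n i : Int) : Bool :=
  (PySem.List.pyGetD cs i ' ' == PySem.List.pyGetD cs (i + 1) ' ' &&
     ("CONST".toList.contains (PySem.List.pyGetD cs i ' '))) ||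
  (PySem.List.pyGetD cs (i + 1) ' ' == 'S' && decide (i + 2 < n) &&
     (PySem.List.pyGetD cs (i + 2) ' ' == PySem.List.pyGetD cs i ' '))

theorem checkLoopA_eq (cs : List Char) (l : List Int) :
    checkLoopA cs l = !(l.any (condA cs)) := by
  induction l with
  | nil => rfl
  | cons i rest ih =>
    rw [List.any_cons, checkLoopA]
    cases h1 : (PySem.List.pyGetD cs i ' ' == 'S') <;>
    cases h2 : (PySem.List.pyGetD cs (i - 1) ' ' == PySem.List.pyGetD cs (i + 1) ' ')
    all_goals simp only [condA, h1, h2, Bool.false_and, Bool.true_and, Bool.and_false,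
      Bool.and_true, Bool.and_self, Bool.false_or, Bool.true_or, Bool.or_false, Bool.or_self,
      reduceIte, Bool.not_true, ih]
    all_goals simp

theorem checkLoopB_eq (cs : List Char) (n : Int) (l : List Int) :
    checkLoopB cs n l = !(l.any (condB cs n)) := by
  induction l with
  | nil => rfl
  | cons i rest ih =>
    rw [List.any_cons, checkLoopB]
    cases h1 : (PySem.List.pyGetD cs i ' ' == PySem.List.pyGetD cs (i + 1) ' ' &&
       ("CONST".toList.contains (PySem.List.pyGetD cs i ' '))) <;>
    cases h2 : (PySem.List.pyGetD cs (i + 1) ' ' == 'S' && decide (i + 2 < n) &&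
            (PySem.List.pyGetD cs (i + 2) ' ' == PySem.List.pyGetD cs i ' '))
    all_goals simp only [condB, h1, h2, Bool.false_or, Bool.true_or, Bool.or_self, Bool.or_false,
      Bool.or_true, reduceIte, Bool.not_true, ih]
    all_goals simp

theorem infix_pair_iff (x : Char) (cs : List Char) :
    [x, x] <:+: cs ↔ ∃ j : Nat, cs[j]? = some x ∧ cs[j + 1]? = some x := by
  constructor
  · rintro ⟨s, t, h⟩
    refine ⟨s.length, ?_, ?_⟩ <;> subst h <;>
      simp [List.getElem?_append_right, List.append_assoc]
  · rintro ⟨j, h1, h2⟩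
    induction cs generalizing j with
    | nil => simp at h1
    | cons c rest ih =>
      cases j with
      | zero =>
        simp at h1
        cases rest with
        | nil => simp at h2
        | cons d rest' =>
          simp at h2
          subst h1; subst h2
          exact ⟨[], rest', rfl⟩
      | succ j' =>
        simp only [List.getElem?_cons_succ] at h1 h2
        obtain ⟨s, t, hst⟩ := ih j' h1 h2
        exact ⟨c :: s, t, by rw [← hst]; rfl⟩

-- pyGetD at a nonnegative literal Nat index is the optional lookup with default
theorem pg (cs : List Char) (j : Nat) :
    PySem.List.pyGetD cs (j : Int) ' ' = (cs[j]?).getD ' ' := by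
  rw [PySem.List.pyGetD_natCast, List.getD_eq_getElem?_getD]

-- the Nat-level violations both programs detect
def PairN (cs : List Char) (j : Nat) : Prop :=
  ∃ x, cs[j]? = some x ∧ cs[j + 1]? = some x ∧ x ∈ (['C', 'O', 'N', 'S', 'T'] : List Char)

def TripN (cs : List Char) (j : Nat) : Prop :=
  ∃ a, cs[j]? = some a ∧ cs[j + 1]? = some 'S' ∧ cs[j + 2]? = some a

theorem L_pair (word : String) :
    (∃ sub ∈ (["CC", "OO", "NN", "SS", "TT"] : List String),
        PySem.Str.isIn sub word = true) ↔ ∃ j, PairN word.toList j := by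
  constructor
  · rintro ⟨sub, hsub, hin⟩
    rw [PySem.Str.isIn_iff_infix] at hin
    have hx : ∃ x ∈ (['C', 'O', 'N', 'S', 'T'] : List Char), sub.toList = [x, x] := by
      fin_cases hsub <;> [exact ⟨'C', by simp, rfl⟩; exact ⟨'O', by simp, rfl⟩;
        exact ⟨'N', by simp, rfl⟩; exact ⟨'S', by simp, rfl⟩; exact ⟨'T', by simp, rfl⟩]
    obtain ⟨x, hxmem, hxeq⟩ := hx
    rw [hxeq] at hin
    obtain ⟨j, h1, h2⟩ := (infix_pair_iff x word.toList).mp hin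
    exact ⟨j, x, h1, h2, hxmem⟩
  · rintro ⟨j, x, h1, h2, hxmem⟩
    have hinf : [x, x] <:+: word.toList := (infix_pair_iff x word.toList).mpr ⟨j, h1, h2⟩
    have : ∃ sub ∈ (["CC", "OO", "NN", "SS", "TT"] : List String), sub.toList = [x, x] := by
      fin_cases hxmem <;> [exact ⟨"CC", by simp, rfl⟩; exact ⟨"OO", by simp, rfl⟩;
        exact ⟨"NN", by simp, rfl⟩; exact ⟨"SS", by simp, rfl⟩; exact ⟨"TT", by simp, rfl⟩]
    obtain ⟨sub, hs, he⟩ := this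
    exact ⟨sub, hs, (PySem.Str.isIn_iff_infix sub word).mpr (he ▸ hinf)⟩

theorem L_A (cs : List Char) :
    (∃ i : Int, (1 ≤ i ∧ i < (cs.length : Int) - 1) ∧ condA cs i = true) ↔
      ∃ j, TripN cs j := by
  constructor
  · rintro ⟨i, ⟨hi1, hi2⟩, hA⟩
    have hj : ∃ j : Nat, i = (j : Int) + 1 ∧ j + 2 < cs.length := by
      refine ⟨(i - 1).toNat, by omega, by omega⟩
    obtain ⟨j, rfl, hjlen⟩ := hj
    simp only [condA, Bool.and_eq_true, beq_iff_eq] at hA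
    obtain ⟨hS, hEq⟩ := hA
    have e1 : (j : Int) + 1 - 1 = (j : Int) := by ring
    have e2 : (j : Int) + 1 + 1 = ((j + 2 : Nat) : Int) := by push_cast; ring
    have e3 : (j : Int) + 1 = ((j + 1 : Nat) : Int) := by push_cast; ring
    rw [e1, pg] at hEq
    rw [e2, pg] at hEq
    rw [e3, pg] at hS
    have g0 : cs[j]? = some cs[j] := List.getElem?_eq_getElem (by omega)
    have g1 : cs[j + 1]? = some cs[j + 1] := List.getElem?_eq_getElem (by omega)
    have g2 : cs[j + 2]? = some cs[j + 2] := List.getElem?_eq_getElem (by omega)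
    refine ⟨j, cs[j], g0, ?_, ?_⟩
    · rw [g1]; rw [g1] at hS; simpa using hS
    · rw [g2]; rw [g0, g2] at hEq; simpa using hEq.symm
  · rintro ⟨j, a, h0, h1, h2⟩
    have hjlen : j + 2 < cs.length := (List.getElem?_eq_some_iff.mp h2).1
    refine ⟨(j : Int) + 1, ⟨by omega, by push_cast; omega⟩, ?_⟩
    simp only [condA, Bool.and_eq_true, beq_iff_eq]
    have e1 : (j : Int) + 1 - 1 = (j : Int) := by ring
    have e2 : (j : Int) + 1 + 1 = ((j + 2 : Nat) : Int) := by push_cast; ring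
    have e3 : (j : Int) + 1 = ((j + 1 : Nat) : Int) := by push_cast; ring
    constructor
    · rw [e3, pg, h1]; rfl
    · rw [e1, e2, pg, pg, h0, h2]

theorem L_B (cs : List Char) :
    (∃ i : Int, (0 ≤ i ∧ i < (cs.length : Int) - 1) ∧ condB cs (cs.length : Int) i = true) ↔
      (∃ j, PairN cs j) ∨ ∃ j, TripN cs j := by
  have hconst : ("CONST".toList : List Char) = ['C', 'O', 'N', 'S', 'T'] := rfl
  constructor
  · rintro ⟨i, ⟨hi0, hi1⟩, hB⟩
    obtain ⟨j, rfl⟩ : ∃ j : Nat, i = (j : Int) := ⟨i.toNat, by omega⟩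
    have hjlen : j + 1 < cs.length := by omega
    have e1 : (j : Int) + 1 = ((j + 1 : Nat) : Int) := by push_cast; ring
    have e2 : (j : Int) + 2 = ((j + 2 : Nat) : Int) := by push_cast; ring
    simp only [condB, Bool.or_eq_true, Bool.and_eq_true, beq_iff_eq] at hB
    have g0 : cs[j]? = some cs[j] := List.getElem?_eq_getElem (by omega)
    have g1 : cs[j + 1]? = some cs[j + 1] := List.getElem?_eq_getElem (by omega)
    rcases hB with ⟨hpair, hmem⟩ | ⟨⟨hS, hlt⟩, hEq⟩
    · left
      rw [pg, g0] at hmem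
      rw [pg, e1, pg, g0, g1] at hpair
      refine ⟨j, cs[j], g0, ?_, ?_⟩
      · rw [g1]; simpa using hpair.symm
      · rw [hconst] at hmem; simpa using hmem
    · right
      have hlt' : j + 2 < cs.length := by simp only [decide_eq_true_eq] at hlt; omega
      have g2 : cs[j + 2]? = some cs[j + 2] := List.getElem?_eq_getElem hlt'
      rw [e1, pg, g1] at hS
      rw [e2, pg, pg, g0, g2] at hEq
      exact ⟨j, cs[j], g0, by rw [g1]; simpa using hS, by rw [g2]; simpa using hEq⟩
  · rintro (⟨j, x, h0, h1, hxmem⟩ | ⟨j, a, h0, h1, h2⟩)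
    · have hjlen : j + 1 < cs.length := (List.getElem?_eq_some_iff.mp h1).1
      refine ⟨(j : Int), ⟨by omega, by push_cast; omega⟩, ?_⟩
      have e1 : (j : Int) + 1 = ((j + 1 : Nat) : Int) := by push_cast; ring
      simp only [condB, Bool.or_eq_true, Bool.and_eq_true, beq_iff_eq]
      left
      rw [pg, e1, pg, h0, h1, hconst]
      exact ⟨rfl, by simpa using hxmem⟩
    · have hjlen : j + 2 < cs.length := (List.getElem?_eq_some_iff.mp h2).1
      refine ⟨(j : Int), ⟨by omega, by push_cast; omega⟩, ?_⟩
      have e1 : (j : Int) + 1 = ((j + 1 : Nat) : Int) := by push_cast; ring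
      have e2 : (j : Int) + 2 = ((j + 2 : Nat) : Int) := by push_cast; ring
      simp only [condB, Bool.or_eq_true, Bool.and_eq_true, beq_iff_eq]
      right
      refine ⟨⟨by rw [e1, pg, h1]; rfl, by simp only [decide_eq_true_eq]; push_cast; omega⟩, ?_⟩
      rw [e2, pg, pg, h0, h2]

theorem bodies_eq (word : String) :
    ((["CC", "OO", "NN", "SS", "TT"] : List String).any (fun sub => PySem.Str.isIn sub word) ||
      (PySem.List.pyRange 1 ((word.toList.length : Int) - 1) 1).any (condA word.toList)) =
    (PySem.List.pyRange 0 ((word.toList.length : Int) - 1) 1).any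
      (condB word.toList (word.toList.length : Int)) := by
  rw [Bool.eq_iff_iff]
  simp only [List.any_eq_true, Bool.or_eq_true, PySem.List.mem_pyRange_one]
  rw [L_B word.toList]
  constructor
  · rintro (⟨sub, hsub, hin⟩ | ⟨i, hi, hA⟩)
    · exact Or.inl ((L_pair word).mp ⟨sub, hsub, hin⟩)
    · exact Or.inr ((L_A word.toList).mp ⟨i, hi, hA⟩)
  · rintro (hp | ht)
    · obtain ⟨sub, hs, hin⟩ := (L_pair word).mpr hp
      exact Or.inl ⟨sub, hs, hin⟩
    · obtain ⟨i, hi, hA⟩ := (L_A word.toList).mpr ht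
      exact Or.inr ⟨i, hi, hA⟩

-- ===== VERDICT (by name: the statement is the Claim_ definition above) =====
theorem check_spec : Claim_equal_check := by
  intro word _ _
  unfold Spec_check check check_alt
  rw [checkLoopA_eq, checkLoopB_eq, Bool.or_comm]
  cases hg : (PySem.List.pyGetD word.toList 0 ' ' == 'S' ||
      PySem.List.pyGetD word.toList (-1) ' ' == 'S')
  case false =>
    have hb := bodies_eq word
    cases hd : (["CC", "OO", "NN", "SS", "TT"] : List String).any
        (fun sub => PySem.Str.isIn sub word) <;>
      cases ha : (PySem.List.pyRange 1 ((word.toList.length : Int) - 1) 1).any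
        (condA word.toList) <;>
      rw [hd, ha] at hb <;>
      simp only [Bool.false_or, Bool.true_or, Bool.or_false, Bool.or_true, Bool.or_self] at hb <;>
      rw [← hb] <;> simp
  case true => rfl
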